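-- pv_equiv track=rewrite | github.com/trettier/list_v2 | ft_pos_neg_separator_lst.py | ft_pos_neg_separator_lst
-- ===== SOURCE A (Python) =====
-- def ft_pos_neg_separator_lst(a):
--     b = []
--     c = []
--     d = []
--     for i in a:
--         if i < 0:
--             b.append(i)
--         elif i > 0:
--             d.append(i)
--         else:
--             c.append(i)
--     return [b, c, d]
-- ===== SOURCE B (Python) =====
-- def ft_pos_neg_separator_lst(a):
--     return [[i for i in a if i < 0],
--             [i for i in a if i == 0],
--             [i for i in a if i > 0]]
-- ===== Notes on version B (the rewrite author's own statement) =====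
-- stated objective: simpler
-- what changed: Replaces the single branching pass with shared mutable accumulators by three independent filtering comprehensions, one per sign bucket, returned directly.
import Mathlib
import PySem

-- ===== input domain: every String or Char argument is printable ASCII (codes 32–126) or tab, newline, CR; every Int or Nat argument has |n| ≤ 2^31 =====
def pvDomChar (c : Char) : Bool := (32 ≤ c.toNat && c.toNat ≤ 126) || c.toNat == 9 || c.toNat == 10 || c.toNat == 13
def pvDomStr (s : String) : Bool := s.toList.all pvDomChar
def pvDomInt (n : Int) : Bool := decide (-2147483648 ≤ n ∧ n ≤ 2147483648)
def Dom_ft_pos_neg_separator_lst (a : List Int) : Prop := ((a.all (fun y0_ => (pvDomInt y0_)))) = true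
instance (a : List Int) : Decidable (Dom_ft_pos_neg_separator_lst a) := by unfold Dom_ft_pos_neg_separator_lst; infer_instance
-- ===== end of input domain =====

-- ===== PORT A =====
-- Header: B computes the three sign buckets with three independent filters instead of one
-- branching pass with shared accumulators (objective: simpler).
def ftSepLoop (st : List Int × List Int × List Int) (i : Int) : List Int × List Int × List Int :=
  if i < 0 then (st.1 ++ [i], st.2.1, st.2.2)
  else if i > 0 then (st.1, st.2.1, st.2.2 ++ [i])
  else (st.1, st.2.1 ++ [i], st.2.2)

def ft_pos_neg_separator_lst (a : List Int) : List (List Int) :=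
  let st := a.foldl ftSepLoop ([], [], [])
  [st.1, st.2.1, st.2.2]

-- ===== PORT B =====
def ft_pos_neg_separator_lst_alt (a : List Int) : List (List Int) :=
  [a.filter (fun i => i < 0), a.filter (fun i => i == 0), a.filter (fun i => i > 0)]

-- ===== PRECONDITION & SPEC =====
def Spec_ft_pos_neg_separator_lst (a : List Int) (out : List (List Int)) : Prop := out = ft_pos_neg_separator_lst_alt a
instance (a : List Int) (out : List (List Int)) : Decidable (Spec_ft_pos_neg_separator_lst a out) := by unfold Spec_ft_pos_neg_separator_lst; infer_instance

-- ===== CLAIM (what is proved, stated in full; the proofs are below) =====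
def Claim_equal_ft_pos_neg_separator_lst : Prop := ∀ (a : List Int), Dom_ft_pos_neg_separator_lst a → Spec_ft_pos_neg_separator_lst a (ft_pos_neg_separator_lst a)

-- ===== LEMMAS AND PROOFS =====
lemma ftSepLoop_inv (a : List Int) (b c d : List Int) :
    a.foldl ftSepLoop (b, c, d) =
      (b ++ a.filter (fun i => i < 0), c ++ a.filter (fun i => i == 0),
       d ++ a.filter (fun i => i > 0)) := by
  induction a generalizing b c d with
  | nil => simp
  | cons x xs ih =>
    simp only [List.foldl_cons, ftSepLoop, List.filter_cons]
    by_cases h1 : x < 0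
    · have h2 : ¬ x > 0 := by omega
      have h3 : ¬ (x == 0) = true := by simp; omega
      simp [h1, h2, h3, ih]
    · by_cases h2 : x > 0
      · have h3 : ¬ (x == 0) = true := by simp; omega
        simp [h1, h2, h3, ih]
      · have h3 : (x == 0) = true := by simp; omega
        simp [h1, h2, h3, ih]

-- ===== VERDICT (by name: the statement is the Claim_ definition above) =====
theorem ft_pos_neg_separator_lst_spec : Claim_equal_ft_pos_neg_separator_lst := by
  intro a _
  unfold Spec_ft_pos_neg_separator_lst ft_pos_neg_separator_lst ft_pos_neg_separator_lst_alt
  simp [ftSepLoop_inv]
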